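-- pv_equiv track=rewrite | github.com/PaulBC/misc_scripts | life_tiles.py | rle_to_coordinates
-- ===== SOURCE A (Python) =====
-- def rle_to_coordinates(rle):
--   lines = rle.strip().split('$')
--   coordinates = []
--   y = 0
--   for line in lines:
--     x = 0
--     count = ''
--     for char in line:
--       if char.isdigit():
--         count += char
--       else:
--         count = int(count) if count != '' else 1
--         if char == 'o':
--           for i in range(count):
--             coordinates.append((x + i, y))
--         x += count
--         count = ''
--     y += 1
--   return coordinates
-- ===== SOURCE B (Python) =====
-- import re
--
-- def rle_to_coordinates(rle):
--   coordinates = []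
--   for y, segment in enumerate(rle.strip().split('$')):
--     x = 0
--     for digits, char in re.findall(r'(\d*)(\D)', segment):
--       count = int(digits) if digits else 1
--       if char == 'o':
--         coordinates.extend((x + i, y) for i in range(count))
--       x += count
--   return coordinates
-- ===== Notes on version B (the rewrite author's own statement) =====
-- stated objective: idiomatic
-- what changed: Replaces the per-character scan with a mutable digit accumulator by regex run-tokenization: each segment is split into (digits, char) tokens with re.findall and one flat loop expands the runs.
import Mathlib
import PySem

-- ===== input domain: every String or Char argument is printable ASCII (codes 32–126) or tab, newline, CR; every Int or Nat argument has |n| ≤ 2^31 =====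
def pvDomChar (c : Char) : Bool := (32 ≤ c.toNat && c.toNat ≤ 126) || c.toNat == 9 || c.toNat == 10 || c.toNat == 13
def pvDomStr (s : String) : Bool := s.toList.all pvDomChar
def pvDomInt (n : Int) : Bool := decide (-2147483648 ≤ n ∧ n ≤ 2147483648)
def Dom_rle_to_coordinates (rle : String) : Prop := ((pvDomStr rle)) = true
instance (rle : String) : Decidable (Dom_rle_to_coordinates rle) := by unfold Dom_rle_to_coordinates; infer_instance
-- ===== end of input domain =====

-- B re-implements the RLE parse by regex-style run tokenization instead of A's per-character
-- digit accumulator; objective: idiomatic, same cost.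

-- ===== PORT A =====
-- int(count) where count is a nonempty digit string: PySem.Int.ofChars? returns some there;
-- the .getD 0 default is unreachable (the guard ensures nonempty digits).
def pvIntOfDigits (ds : List Char) : Int := (PySem.Int.ofChars? ds).getD 0

-- one character of A's inner loop; state = (x, count-accumulator, coordinates)
def pvAstep (y : Int) (s : Int × List Char × List (Int × Int)) (c : Char) :
    Int × List Char × List (Int × Int) :=
  if PySem.Chars.isdigit c then (s.1, s.2.1 ++ [c], s.2.2)
  else
    let count : Int := if s.2.1 ≠ [] then pvIntOfDigits s.2.1 else 1
    let coords := if c = 'o'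
      then s.2.2 ++ (PySem.List.pyRange 0 count 1).map (fun i => (s.1 + i, y))
      else s.2.2
    (s.1 + count, [], coords)

def pvAline (y : Int) (acc : List (Int × Int)) (line : List Char) : List (Int × Int) :=
  (line.foldl (pvAstep y) (0, [], acc)).2.2

def rle_to_coordinates (rle : String) : List (Int × Int) :=
  let lines := PySem.Chars.splitOn (PySem.Chars.strip rle.toList) ['$']
  (lines.foldl (fun (st : List (Int × Int) × Int) line =>
      (pvAline st.2 st.1 line, st.2 + 1)) ([], 0)).1

-- ===== PORT B =====
-- re.findall(r'(\d*)(\D)', segment): maximal digit runs each followed by one non-digit;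
-- trailing digits with no following char are dropped. Exact on the ASCII domain.
def pvTokens (l : List Char) : List (List Char × Char) :=
  match h : l.dropWhile PySem.Chars.isdigit with
  | [] => []
  | c :: r => (l.takeWhile PySem.Chars.isdigit, c) :: pvTokens r
termination_by l.length
decreasing_by
  have := List.length_dropWhile_le (p := PySem.Chars.isdigit) (l := l)
  simp [h] at this; omega

-- one token of B's loop; state = (coordinates, x)
def pvBtok (y : Int) (s : List (Int × Int) × Int) (t : List Char × Char) :
    List (Int × Int) × Int :=
  let count : Int := if t.1 ≠ [] then pvIntOfDigits t.1 else 1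
  let coords := if t.2 = 'o'
    then s.1 ++ (PySem.List.pyRange 0 count 1).map (fun i => (s.2 + i, y))
    else s.1
  (coords, s.2 + count)

def pvBline (y : Int) (acc : List (Int × Int)) (seg : List Char) : List (Int × Int) :=
  ((pvTokens seg).foldl (pvBtok y) (acc, 0)).1

def rle_to_coordinates_alt (rle : String) : List (Int × Int) :=
  let segs := PySem.Chars.splitOn (PySem.Chars.strip rle.toList) ['$']
  (PySem.List.enumerate segs 0).foldl (fun coords p => pvBline p.1 coords p.2) []

-- ===== PRECONDITION & SPEC =====
def Spec_rle_to_coordinates (rle : String) (out : List (Int × Int)) : Prop := out = rle_to_coordinates_alt rle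
instance (rle : String) (out : List (Int × Int)) : Decidable (Spec_rle_to_coordinates rle out) := by unfold Spec_rle_to_coordinates; infer_instance

-- ===== CLAIM (what is proved, stated in full; the proofs are below) =====
def Claim_equal_rle_to_coordinates : Prop := ∀ (rle : String), Dom_rle_to_coordinates rle → Spec_rle_to_coordinates rle (rle_to_coordinates rle)

-- ===== LEMMAS AND PROOFS =====

theorem pv_dropWhile_all_append (p : Char → Bool) (cnt l : List Char)
    (hc : cnt.all p = true) : (cnt ++ l).dropWhile p = l.dropWhile p := by
  induction cnt with
  | nil => rfl
  | cons a t ih =>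
    simp only [List.all_cons, Bool.and_eq_true] at hc
    simp [hc.1, ih hc.2]

theorem pv_takeWhile_all_append (p : Char → Bool) (cnt l : List Char)
    (hc : cnt.all p = true) : (cnt ++ l).takeWhile p = cnt ++ l.takeWhile p := by
  induction cnt with
  | nil => rfl
  | cons a t ih =>
    simp only [List.all_cons, Bool.and_eq_true] at hc
    simp [hc.1, ih hc.2]

theorem pvTokens_all_digits (cnt : List Char) (hc : cnt.all PySem.Chars.isdigit = true) :
    pvTokens cnt = [] := by
  rw [pvTokens]
  split
  · rfl
  · rename_i c r h
    have : cnt.dropWhile PySem.Chars.isdigit = [] := by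
      have := pv_dropWhile_all_append PySem.Chars.isdigit cnt [] hc
      simpa using this
    simp [this] at h

theorem pvTokens_append_nondigit (cnt : List Char) (c : Char) (r : List Char)
    (hc : cnt.all PySem.Chars.isdigit = true) (hdig : PySem.Chars.isdigit c = false) :
    pvTokens (cnt ++ c :: r) = (cnt, c) :: pvTokens r := by
  have hd : (cnt ++ c :: r).dropWhile PySem.Chars.isdigit = c :: r := by
    rw [pv_dropWhile_all_append _ _ _ hc]
    simp [hdig]
  have ht : (cnt ++ c :: r).takeWhile PySem.Chars.isdigit = cnt := by
    rw [pv_takeWhile_all_append _ _ _ hc]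
    simp [hdig]
  rw [pvTokens]
  split
  · rename_i h; rw [hd] at h; cases h
  · rename_i c' r' h
    rw [hd] at h
    injection h with h1 h2
    subst h1; subst h2
    rw [ht]

-- A's inner char scan with pending digit accumulator cnt equals B's token fold on cnt ++ l.
theorem pv_seg_eq (y : Int) (l cnt : List Char) (x : Int) (acc : List (Int × Int))
    (hc : cnt.all PySem.Chars.isdigit = true) :
    (l.foldl (pvAstep y) (x, cnt, acc)).2.2 =
      ((pvTokens (cnt ++ l)).foldl (pvBtok y) (acc, x)).1 := by
  induction l generalizing cnt x acc with
  | nil =>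
    rw [List.append_nil, pvTokens_all_digits cnt hc]
    simp
  | cons c r ih =>
    by_cases hdig : PySem.Chars.isdigit c = true
    · have hc' : (cnt ++ [c]).all PySem.Chars.isdigit = true := by
        simp [List.all_append, hc, hdig]
      have := ih (cnt ++ [c]) x acc hc'
      simp only [List.foldl_cons, pvAstep, hdig, if_true] at *
      rw [this, List.append_assoc]
      rfl
    · rw [pvTokens_append_nondigit cnt c r hc (by simpa using hdig)]
      have hdig' : PySem.Chars.isdigit c = false := by simpa using hdig
      simp only [List.foldl_cons, pvAstep, hdig', Bool.false_eq_true, if_false]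
      rw [ih [] _ _ rfl]
      simp only [List.nil_append, pvBtok]

theorem pvAline_eq_pvBline (y : Int) (acc : List (Int × Int)) (line : List Char) :
    pvAline y acc line = pvBline y acc line := by
  have := pv_seg_eq y line [] 0 acc rfl
  simpa [pvAline, pvBline] using this

theorem pv_outer_eq (lines : List (List Char)) (acc : List (Int × Int)) (y : Int) :
    (lines.foldl (fun (st : List (Int × Int) × Int) line =>
        (pvAline st.2 st.1 line, st.2 + 1)) (acc, y)).1 =
      (PySem.List.enumerate lines y).foldl (fun coords p => pvBline p.1 coords p.2) acc := by
  induction lines generalizing acc y with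
  | nil => simp [PySem.List.enumerate_nil]
  | cons l t ih =>
    rw [PySem.List.enumerate_cons]
    simp only [List.foldl_cons]
    rw [ih, pvAline_eq_pvBline]

-- ===== VERDICT (by name: the statement is the Claim_ definition above) =====
theorem rle_to_coordinates_spec : Claim_equal_rle_to_coordinates := by
  intro rle _
  unfold Spec_rle_to_coordinates rle_to_coordinates rle_to_coordinates_alt
  exact pv_outer_eq _ [] 0
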